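-- pv_equiv track=rewrite | github.com/RJToky/ML-Sardinas | util.py | transition_0_1
-- ===== SOURCE A (Python) =====
-- def transition_0_1(word):
--     temp = 0
--     output = 0
--     for c in word:
--         if c == '0':
--             temp = 1
--         if temp > 0:
--             if c == '1':
--                 output += 1
--                 temp = 0
--     return output
-- ===== SOURCE B (Python) =====
-- def transition_0_1(word):
--     output = 0
--     i = word.find('0')
--     while i != -1:
--         j = word.find('1', i + 1)
--         if j == -1:
--             break
--         output += 1
--         i = word.find('0', j + 1)
--     return output
-- ===== Notes on version B (the rewrite author's own statement) =====
-- stated objective: faster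
-- what changed: Replaced the per-character flag-machine loop by a str.find-driven scan that jumps to the next zero and then to the next one, counting non-overlapping zero-then-one pairs.
import Mathlib
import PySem

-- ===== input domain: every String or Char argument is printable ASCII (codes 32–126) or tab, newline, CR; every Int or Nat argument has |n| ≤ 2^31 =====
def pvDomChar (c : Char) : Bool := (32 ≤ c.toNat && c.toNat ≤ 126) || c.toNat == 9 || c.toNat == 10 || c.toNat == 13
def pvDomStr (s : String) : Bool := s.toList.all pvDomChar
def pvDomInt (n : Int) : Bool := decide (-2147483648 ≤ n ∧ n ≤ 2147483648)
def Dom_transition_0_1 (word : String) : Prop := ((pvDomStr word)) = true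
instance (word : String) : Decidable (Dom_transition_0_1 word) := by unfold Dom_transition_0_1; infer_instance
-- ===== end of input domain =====

-- B replaces A's per-character flag machine by a jump scan to the next '0' then the next '1' (alternative decomposition, same result).

-- ===== PORT A =====
-- literal port of A: fold over the characters with state (temp, output)
def transition_0_1 (word : String) : Int :=
  (word.toList.foldl
    (fun (s : Int × Int) c =>
      let temp := if c = '0' then 1 else s.1
      if temp > 0 then
        if c = '1' then (0, s.2 + 1) else (temp, s.2)
      else (temp, s.2))
    (0, 0)).2

-- ===== PORT B =====
-- port of Source B's find-driven scan: skip to the next '0', then skip to the next '1',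
-- count one pair and continue after the matched '1' (str.find = dropWhile on the char list)
def pvJumpCount (cs : List Char) : Int :=
  let r := cs.dropWhile (· ≠ '0')        -- word.find('0', …): -1 ↔ no '0' remains
  if hr : r = [] then 0
  else
    let r2 := r.tail.dropWhile (· ≠ '1') -- word.find('1', i + 1)
    if hr2 : r2 = [] then 0
    else 1 + pvJumpCount r2.tail         -- count the pair, continue after the matched '1'
termination_by cs.length
decreasing_by
  show r2.tail.length < cs.length
  have g1 : r.length ≤ cs.length := cs.length_dropWhile_le _
  have g2 : r2.length ≤ r.tail.length := r.tail.length_dropWhile_le _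
  have h1 : r.tail.length = r.length - 1 := List.length_tail
  have h2 : r2.tail.length = r2.length - 1 := List.length_tail
  have n1 : r.length ≠ 0 := fun h => hr (List.eq_nil_of_length_eq_zero h)
  have n2 : r2.length ≠ 0 := fun h => hr2 (List.eq_nil_of_length_eq_zero h)
  omega

def transition_0_1_alt (word : String) : Int := pvJumpCount word.toList

-- ===== PRECONDITION & SPEC =====
def Spec_transition_0_1 (word : String) (out : Int) : Prop := out = transition_0_1_alt word
instance (word : String) (out : Int) : Decidable (Spec_transition_0_1 word out) := by unfold Spec_transition_0_1; infer_instance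

-- ===== CLAIM (what is proved, stated in full; the proofs are below) =====
def Claim_equal_transition_0_1 : Prop := ∀ (word : String), Dom_transition_0_1 word → Spec_transition_0_1 word (transition_0_1 word)

-- ===== LEMMAS AND PROOFS =====

-- proof-side helper: B's count from "seeking a '1'" state
def pvSeek1 (cs : List Char) : Int :=
  let r2 := cs.dropWhile (· ≠ '1')
  if r2 = [] then 0 else 1 + pvJumpCount r2.tail

theorem pvJumpCount_nil : pvJumpCount [] = 0 := by
  rw [pvJumpCount.eq_def]
  simp

theorem pvSeek1_nil : pvSeek1 [] = 0 := by
  simp [pvSeek1]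

theorem pvJumpCount_cons (c : Char) (cs : List Char) :
    pvJumpCount (c :: cs) = if c = '0' then pvSeek1 cs else pvJumpCount cs := by
  by_cases hc : c = '0'
  · rw [pvJumpCount.eq_def]
    simp only [List.dropWhile_cons, hc, ne_eq, not_true_eq_false, decide_false,
      Bool.false_eq_true, if_false, if_pos, List.tail_cons, pvSeek1]
    simp
  · rw [if_neg hc, pvJumpCount.eq_def]
    conv_rhs => rw [pvJumpCount.eq_def]
    simp only [List.dropWhile_cons, ne_eq, hc, not_false_eq_true, decide_true, if_true]

theorem pvSeek1_cons (c : Char) (cs : List Char) :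
    pvSeek1 (c :: cs) = if c = '1' then 1 + pvJumpCount cs else pvSeek1 cs := by
  by_cases hc : c = '1'
  · simp only [pvSeek1, List.dropWhile_cons, hc, ne_eq, not_true_eq_false, decide_false,
      Bool.false_eq_true, if_false, List.tail_cons]
    simp
  · simp only [pvSeek1, List.dropWhile_cons, ne_eq, hc, not_false_eq_true, decide_true, if_true]
    simp

-- the step function of A's fold, named for the induction
def pvStepA (s : Int × Int) (c : Char) : Int × Int :=
  let temp := if c = '0' then 1 else s.1
  if temp > 0 then
    if c = '1' then (0, s.2 + 1) else (temp, s.2)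
  else (temp, s.2)

theorem pvFold_eq (cs : List Char) : ∀ o : Int,
    (cs.foldl pvStepA (0, o)).2 = o + pvJumpCount cs ∧
    (cs.foldl pvStepA (1, o)).2 = o + pvSeek1 cs := by
  induction cs with
  | nil => intro o; simp [pvJumpCount_nil, pvSeek1_nil]
  | cons c cs ih =>
    intro o
    constructor
    · rw [List.foldl_cons, pvJumpCount_cons]
      by_cases h0 : c = '0'
      · have h1 : c ≠ '1' := by rw [h0]; decide
        simp [pvStepA, h0, (ih o).2]
      · by_cases h1 : c = '1'
        · simp [pvStepA, h1, (ih o).1]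
        · simp [pvStepA, h0, (ih o).1]
    · rw [List.foldl_cons, pvSeek1_cons]
      by_cases h1 : c = '1'
      · have h0 : c ≠ '0' := by rw [h1]; decide
        simp [pvStepA, h1, (ih (o + 1)).1]
        omega
      · by_cases h0 : c = '0'
        · simp [pvStepA, h0, (ih o).2]
        · simp [pvStepA, h0, h1, (ih o).2]

theorem pvA_as_step (word : String) :
    transition_0_1 word = (word.toList.foldl pvStepA (0, 0)).2 := rfl

-- ===== VERDICT (by name: the statement is the Claim_ definition above) =====
theorem transition_0_1_spec : Claim_equal_transition_0_1 := by
  intro word _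
  show transition_0_1 word = transition_0_1_alt word
  rw [pvA_as_step, (pvFold_eq word.toList 0).1]
  simp [transition_0_1_alt]
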